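-- pv_equiv track=rewrite | github.com/SanyogitaPiya/LLM4TDD-Manual-Vs-Automated | ManualTDD/BVA tests/BitwiseXOR.py | bitwiseXOROfAllPairings
-- ===== SOURCE A (Python) =====
-- def bitwiseXOROfAllPairings(nums1, nums2):
--     # Initialize the result to 0
--     result = 0
--     n, m = len(nums1), len(nums2)
--
--     # Loop over each bit position (0 to 31)
--     for bit in range(32):
--         # Count how many numbers in nums1 have the current bit set to 1
--         count1 = sum((num >> bit) & 1 for num in nums1)
--         # Count how many numbers in nums2 have the current bit set to 1
--         count2 = sum((num >> bit) & 1 for num in nums2)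
--
--         # Calculate the number of pairs where the bit positions are different
--         # A pair contributes to this bit if one number has the bit set and the other doesn't
--         count_pairs = count1 * (m - count2) + (n - count1) * count2
--
--         # Each differing pair contributes 2^bit to the final result
--         result |= (count_pairs % 2) << bit
--
--     return result
-- ===== SOURCE B (Python) =====
-- def bitwiseXOROfAllPairings(nums1, nums2):
--     # Each answer bit is the parity of differing bit pairs, which reduces to
--     # XOR-folding nums1 when len(nums2) is odd and nums2 when len(nums1) is odd,
--     # truncated to 32 bits; one pass per list instead of 32 counting passes.
--     y = 0
--     if len(nums2) % 2 == 1: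
--         for v in nums1:
--             y ^= v
--     if len(nums1) % 2 == 1:
--         for v in nums2:
--             y ^= v
--     return y & 0xFFFFFFFF
-- ===== Notes on version B (the rewrite author's own statement) =====
-- stated objective: faster
-- what changed: Replaced the 32-iteration per-bit popcount-parity loop over both arrays with a single XOR fold per array (included iff the other array's length is odd) followed by one 32-bit mask.
import Mathlib
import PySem

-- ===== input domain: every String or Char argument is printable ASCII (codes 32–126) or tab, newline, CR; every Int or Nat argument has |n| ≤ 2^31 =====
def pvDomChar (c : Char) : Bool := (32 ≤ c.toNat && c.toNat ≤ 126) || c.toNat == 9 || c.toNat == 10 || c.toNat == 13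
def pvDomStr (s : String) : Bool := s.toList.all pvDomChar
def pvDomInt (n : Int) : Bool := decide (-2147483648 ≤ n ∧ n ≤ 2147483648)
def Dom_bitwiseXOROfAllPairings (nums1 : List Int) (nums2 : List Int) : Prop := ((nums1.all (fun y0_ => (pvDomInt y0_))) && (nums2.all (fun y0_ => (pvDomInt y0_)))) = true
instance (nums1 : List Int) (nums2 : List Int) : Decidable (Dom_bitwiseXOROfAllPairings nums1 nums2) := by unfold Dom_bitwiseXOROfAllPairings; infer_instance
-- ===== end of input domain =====

-- B replaces A's 32 per-bit counting passes with one XOR fold per array plus a 32-bit mask (objective: faster, constant factor).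

-- ===== PORT A =====
def bitwiseXOROfAllPairings (nums1 : List Int) (nums2 : List Int) : Int :=
  let n : Int := (nums1.length : Int)
  let m : Int := (nums2.length : Int)
  -- for bit in range(32): …  (bit ∈ [0,32), so 'bit.toNat' is the exact shift count)
  (PySem.List.pyRange 0 32 1).foldl (fun result bit =>
    let count1 := (nums1.map (fun num => PySem.Int.band (num >>> bit.toNat) 1)).sum
    let count2 := (nums2.map (fun num => PySem.Int.band (num >>> bit.toNat) 1)).sum
    let count_pairs := count1 * (m - count2) + (n - count1) * count2
    PySem.Int.bor result (PySem.Int.mod count_pairs 2 <<< bit.toNat)) 0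

-- ===== PORT B =====
def bitwiseXOROfAllPairings_alt (nums1 : List Int) (nums2 : List Int) : Int :=
  let y : Int := 0
  let y := if nums2.length % 2 == 1 then nums1.foldl (fun y v => PySem.Int.bxor y v) y else y
  let y := if nums1.length % 2 == 1 then nums2.foldl (fun y v => PySem.Int.bxor y v) y else y
  PySem.Int.band y 4294967295

-- ===== PRECONDITION & SPEC =====
def Spec_bitwiseXOROfAllPairings (nums1 : List Int) (nums2 : List Int) (out : Int) : Prop := out = bitwiseXOROfAllPairings_alt nums1 nums2
instance (nums1 : List Int) (nums2 : List Int) (out : Int) : Decidable (Spec_bitwiseXOROfAllPairings nums1 nums2 out) := by unfold Spec_bitwiseXOROfAllPairings; infer_instance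

-- ===== CLAIM (what is proved, stated in full; the proofs are below) =====
def Claim_equal_bitwiseXOROfAllPairings : Prop := ∀ (nums1 : List Int) (nums2 : List Int), Dom_bitwiseXOROfAllPairings nums1 nums2 → Spec_bitwiseXOROfAllPairings nums1 nums2 (bitwiseXOROfAllPairings nums1 nums2)

-- ===== LEMMAS AND PROOFS =====
def ibit (x : Int) (k : Nat) : Int := x / 2 ^ k % 2

theorem ediv_neg_succ (z d : Int) (hd : 0 < d) : (-z - 1) / d = -(z / d) - 1 ∧ (-z - 1) % d = d - 1 - z % d := by
  have h := Int.ediv_add_emod z d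
  have h2 := Int.emod_nonneg z (ne_of_gt hd)
  have h3 := Int.emod_lt_of_pos z hd
  have key := (Int.ediv_emod_unique (a := -z - 1) (q := -(z / d) - 1) (r := d - 1 - z % d) hd).mpr
    ⟨by linear_combination -h, by omega, by omega⟩
  exact ⟨key.1, key.2⟩

theorem ibit_natCast (n k : Nat) : ibit (n : Int) k = if n.testBit k then 1 else 0 := by
  unfold ibit
  rw [Nat.testBit_eq_decide_div_mod_eq]
  rw [show ((2:Int)^k) = ((2^k : Nat) : Int) by push_cast; ring, ← Int.natCast_div]
  have h2 : ((n / 2 ^ k : Nat) : Int) % 2 = ((n / 2 ^ k % 2 : Nat) : Int) := by omega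
  rw [h2]
  rcases Nat.mod_two_eq_zero_or_one (n / 2 ^ k) with h | h <;> rw [h] <;> simp

theorem ibit_testBit (x : Int) (k : Nat) : ibit x k = if x.testBit k then 1 else 0 := by
  cases x with
  | ofNat n => rw [Int.ofNat_eq_natCast, ibit_natCast]; rfl
  | negSucc m =>
    have hd : (0:Int) < 2^k := by positivity
    have e1 := (ediv_neg_succ (m:Int) (2^k) hd).1
    have e2 := (ediv_neg_succ ((m:Int) / 2^k) 2 (by omega)).2
    have : ibit (Int.negSucc m) k = 1 - ibit (m:Int) k := by
      unfold ibit
      rw [Int.negSucc_eq, show (-(↑m+1) : Int) = -↑m - 1 by ring, e1,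
        show (-(↑m / 2^k) - 1 : Int) = -(↑m / 2^k) - 1 by ring, e2]
      ring
    rw [this, ibit_natCast]
    have ht : (Int.negSucc m).testBit k = !(m.testBit k) := rfl
    rw [ht]
    cases hm : m.testBit k <;> simp [hm]

theorem bxor_eq_lxor (a b : Int) : PySem.Int.bxor a b = Int.xor a b := by
  unfold PySem.Int.bxor
  cases a with
  | ofNat m =>
    cases b with
    | ofNat n => simp [Int.xor]
    | negSucc n =>
      simp only [Int.xor, Int.negSucc_eq, Int.ofNat_eq_natCast]
      rw [if_pos (by omega), if_neg (by omega)]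
      have h1 : ((m : Int).toNat) = m := rfl
      have h2 : (-(-(↑n + 1) : Int) - 1).toNat = n := by omega
      rw [h1, h2]; ring
  | negSucc m =>
    cases b with
    | ofNat n =>
      simp only [Int.xor, Int.negSucc_eq, Int.ofNat_eq_natCast]
      rw [if_neg (by omega), if_pos (by omega)]
      have h2 : (-(-(↑m + 1) : Int) - 1).toNat = m := by omega
      have h1 : ((n : Int).toNat) = n := rfl
      rw [h2, h1]; ring
    | negSucc n =>
      simp only [Int.xor, Int.negSucc_eq]
      rw [if_neg (by omega), if_neg (by omega)]
      have h2 : (-(-(↑m + 1) : Int) - 1).toNat = m := by omega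
      have h3 : (-(-(↑n + 1) : Int) - 1).toNat = n := by omega
      rw [h2, h3]

theorem ibit_bxor (a b : Int) (k : Nat) : ibit (PySem.Int.bxor a b) k = (ibit a k + ibit b k) % 2 := by
  rw [bxor_eq_lxor, ibit_testBit, ibit_testBit, ibit_testBit, Int.testBit_lxor]
  cases a.testBit k <;> cases b.testBit k <;> simp

theorem band_shift_one (x : Int) (k : Nat) : PySem.Int.band (x >>> k) 1 = ibit x k := by
  rw [PySem.Int.band_one, PySem.Int.mod_eq_emod_of_pos (by omega), Int.shiftRight_eq_div_pow]
  unfold ibit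
  norm_num

theorem shiftRight_intCast (x : Int) (k : Nat) : x >>> ((k : Nat) : Int) = x >>> k := by
  cases x with
  | ofNat m => rw [Int.ofNat_eq_natCast, Int.shiftRight_natCast]; rfl
  | negSucc m => rw [Int.shiftRight_negSucc]; rfl

theorem band_shift_one' (x : Int) (k : Nat) : PySem.Int.band (x >>> ((k : Nat) : Int)) 1 = ibit x k := by
  rw [shiftRight_intCast, band_shift_one]

theorem lor_two_pow_of_lt {a k : Nat} (h : a < 2 ^ k) : a ||| 2 ^ k = 2 ^ k + a := by
  apply Nat.eq_of_testBit_eq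
  intro j
  rw [Nat.testBit_lor, show 2^k + a = 2^k * 1 + a by ring, Nat.testBit_two_pow_mul_add 1 h]
  rcases lt_trichotomy j k with hj | hj | hj
  · simp [Nat.testBit_two_pow, hj, Nat.ne_of_gt hj]
  · subst hj
    simp [Nat.testBit_two_pow, Nat.testBit_one_eq_true_iff_self_eq_zero]
  · have hb : a.testBit j = false := Nat.testBit_lt_two_pow (lt_of_lt_of_le h (Nat.pow_le_pow_right (by omega) (by omega)))
    have h1 : Nat.testBit 1 (j - k) = false := by
      rw [show (1:Nat) = 2^0 by norm_num, Nat.testBit_two_pow]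
      simp; omega
    rw [if_neg (by omega : ¬ j < k), h1, hb, Nat.testBit_two_pow]
    simp [Nat.ne_of_lt hj]

theorem ibit_cases (x : Int) (k : Nat) : ibit x k = 0 ∨ ibit x k = 1 := by
  rw [ibit_testBit]; cases x.testBit k <;> simp

theorem foldl_bxor_ibit (xs : List Int) (y : Int) (k : Nat) :
    ibit (xs.foldl (fun y v => PySem.Int.bxor y v) y) k = (ibit y k + (xs.map (fun x => ibit x k)).sum) % 2 := by
  induction xs generalizing y with
  | nil =>
    simp only [List.foldl_nil, List.map_nil, List.sum_nil, add_zero]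
    rcases ibit_cases y k with h | h <;> rw [h] <;> rfl
  | cons x xs ih =>
    simp only [List.foldl_cons, List.map_cons, List.sum_cons]
    rw [ih, ibit_bxor]
    omega

theorem bor_step (r p : Int) (k : Nat) (hr0 : 0 ≤ r) (hr : r < 2 ^ k) (hp : p = 0 ∨ p = 1) :
    PySem.Int.bor r (p <<< ((k : Nat) : Int)) = r + p * 2 ^ k := by
  rcases hp with h | h <;> subst h
  · rw [Int.shiftLeft_eq_mul_pow, zero_mul, PySem.Int.bor_of_nonneg hr0 le_rfl]
    simp [Int.toNat_of_nonneg hr0]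
  · rw [Int.shiftLeft_eq_mul_pow, one_mul,
      PySem.Int.bor_of_nonneg hr0 (by positivity), Int.toNat_natCast]
    have h2k : ((2:Int))^k = ((2^k : Nat) : Int) := by push_cast; ring
    rw [h2k] at hr
    have hlt : r.toNat < 2^k := by omega
    rw [lor_two_pow_of_lt hlt]
    push_cast
    omega

theorem emod_two_pow_succ (y : Int) (k : Nat) : y % 2 ^ (k + 1) = y % 2 ^ k + ibit y k * 2 ^ k := by
  have hd : (0:Int) < 2 ^ k := by positivity
  set d : Int := 2 ^ k with hdd
  have h2 : (2:Int) ^ (k+1) = 2 * d := by rw [hdd]; ring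
  have hq := Int.ediv_add_emod y (2*d)
  have hr0 : 0 ≤ y % (2*d) := Int.emod_nonneg y (by omega)
  have hr1 : y % (2*d) < 2*d := Int.emod_lt_of_pos y (by omega)
  set r : Int := y % (2*d) with hrr
  have hy : y = r + (2 * (y / (2*d))) * d := by rw [hrr]; linear_combination -hq
  have hdiv : y / d = r / d + 2 * (y / (2*d)) := by
    conv_lhs => rw [hy]
    rw [Int.add_mul_ediv_right _ _ (by omega : d ≠ 0)]
  have hrd0 : 0 ≤ r / d := Int.ediv_nonneg hr0 (by omega)
  have hrd1 : r / d < 2 := by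
    rw [Int.ediv_lt_iff_lt_mul hd]; omega
  have hmod : y % d = r % d := by
    conv_lhs => rw [hy]
    rw [Int.add_mul_emod_self_right]
  have hrdm : r % d = r - d * (r / d) := by
    have := Int.ediv_add_emod r d; omega
  have hibit : ibit y k = r / d := by
    unfold ibit
    rw [← hdd, hdiv]
    omega
  rw [h2, ← hrr, hmod, hibit, hrdm]
  ring

theorem ibit_zero (k : Nat) : ibit 0 k = 0 := by unfold ibit; simp

theorem band_mask (y : Int) (i : Nat) : PySem.Int.band y (2 ^ i - 1) = y % 2 ^ i := by
  have h1 : (1:Int) ≤ 2 ^ i := by have : (0:Int) < 2 ^ i := by positivity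
                                  omega
  have h2k : ((2:Int)) ^ i = ((2 ^ i : Nat) : Int) := by push_cast; ring
  have ht : ((2 ^ i - 1 : Int)).toNat = 2 ^ i - 1 := by omega
  unfold PySem.Int.band
  by_cases hy : 0 ≤ y
  · rw [if_pos hy, if_pos (by omega), ht, Nat.and_two_pow_sub_one_eq_mod, Int.natCast_mod]
    push_cast [Int.toNat_of_nonneg hy]
    ring_nf
  · rw [if_neg hy, if_pos (by omega), ht]
    set z : Nat := (-y - 1).toNat with hzz
    have hz : (z : Int) = -y - 1 := by omega
    rw [Nat.land_comm, Nat.and_two_pow_sub_one_eq_mod]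
    have he := (ediv_neg_succ (z : Int) (2 ^ i) (by positivity)).2
    have hy2 : -(z:Int) - 1 = y := by omega
    rw [hy2] at he
    have hcast : ((z % 2 ^ i : Nat) : Int) = (z : Int) % 2 ^ i := by
      rw [Int.natCast_mod]; push_cast; ring_nf
    have hle : z % 2 ^ i ≤ 2 ^ i - 1 := by
      have := Nat.mod_lt z (show 0 < 2^i by positivity); omega
    omega

def yval (nums1 nums2 : List Int) : Int :=
  let y : Int := 0
  let y := if nums2.length % 2 == 1 then nums1.foldl (fun y v => PySem.Int.bxor y v) y else y
  if nums1.length % 2 == 1 then nums2.foldl (fun y v => PySem.Int.bxor y v) y else y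

theorem pbit_eq (nums1 nums2 : List Int) (k : Nat) :
    PySem.Int.mod ((nums1.map (fun x => ibit x k)).sum * ((nums2.length : Int) - (nums2.map (fun x => ibit x k)).sum)
      + ((nums1.length : Int) - (nums1.map (fun x => ibit x k)).sum) * (nums2.map (fun x => ibit x k)).sum) 2
    = ibit (yval nums1 nums2) k := by
  rw [PySem.Int.mod_eq_emod_of_pos (by omega)]
  set c1 : Int := (nums1.map (fun x => ibit x k)).sum with hc1
  set c2 : Int := (nums2.map (fun x => ibit x k)).sum with hc2
  set m : Int := (nums2.length : Int) with hm
  set n : Int := (nums1.length : Int) with hn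
  have hkey : (c1 * (m - c2) + (n - c1) * c2) % 2 = (c1 * m + c2 * n) % 2 := by
    rw [show c1 * (m - c2) + (n - c1) * c2 = (c1 * m + c2 * n) + (-(c1 * c2)) * 2 by ring,
      Int.add_mul_emod_self_right]
  rw [hkey]
  have hf1 := foldl_bxor_ibit nums1 0 k
  have hf2 : ∀ y0, ibit (nums2.foldl (fun y v => PySem.Int.bxor y v) y0) k
      = (ibit y0 k + c2) % 2 := fun y0 => foldl_bxor_ibit nums2 y0 k
  rw [ibit_zero] at hf1
  unfold yval
  by_cases hA : nums2.length % 2 = 1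
  · by_cases hB : nums1.length % 2 = 1
    · simp only [hA, hB, beq_self_eq_true, if_pos]
      rw [hf2, hf1]
      have hm1 : m % 2 = 1 := by omega
      have hn1 : n % 2 = 1 := by omega
      rw [Int.add_emod (c1 * m), Int.mul_emod c1 m, Int.mul_emod c2 n, hm1, hn1]
      omega
    · have hB0 : nums1.length % 2 = 0 := by omega
      simp only [hA, hB0, beq_self_eq_true, if_pos, show (0 == 1) = false from rfl, if_neg, Bool.false_eq_true, if_false]
      rw [hf1]
      have hm1 : m % 2 = 1 := by omega
      have hn1 : n % 2 = 0 := by omega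
      rw [Int.add_emod (c1 * m), Int.mul_emod c1 m, Int.mul_emod c2 n, hm1, hn1]
      omega
  · have hA0 : nums2.length % 2 = 0 := by omega
    by_cases hB : nums1.length % 2 = 1
    · simp only [hA0, hB, beq_self_eq_true, if_pos, show (0 == 1) = false from rfl, Bool.false_eq_true, if_false]
      rw [hf2, ibit_zero]
      have hm1 : m % 2 = 0 := by omega
      have hn1 : n % 2 = 1 := by omega
      rw [Int.add_emod (c1 * m), Int.mul_emod c1 m, Int.mul_emod c2 n, hm1, hn1]
      omega
    · have hB0 : nums1.length % 2 = 0 := by omega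
      simp only [hA0, hB0, show (0 == 1) = false from rfl, Bool.false_eq_true, if_false]
      rw [ibit_zero]
      have hm1 : m % 2 = 0 := by omega
      have hn1 : n % 2 = 0 := by omega
      rw [Int.add_emod (c1 * m), Int.mul_emod c1 m, Int.mul_emod c2 n, hm1, hn1]
      omega

theorem A_fold (nums1 nums2 : List Int) (K : Nat) :
    (PySem.List.pyRange 0 (K : Int) 1).foldl (fun result bit =>
      let count1 := (nums1.map (fun num => PySem.Int.band (num >>> bit.toNat) 1)).sum
      let count2 := (nums2.map (fun num => PySem.Int.band (num >>> bit.toNat) 1)).sum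
      let count_pairs := count1 * ((nums2.length : Int) - count2) + ((nums1.length : Int) - count1) * count2
      PySem.Int.bor result (PySem.Int.mod count_pairs 2 <<< bit.toNat)) 0
    = yval nums1 nums2 % 2 ^ K := by
  induction K with
  | zero =>
    rw [show ((0 : Nat) : Int) = 0 from rfl, show PySem.List.pyRange 0 0 1 = ([] : List Int) from by decide]
    simp
  | succ K ih =>
    have hcast : ((K + 1 : Nat) : Int) = (K : Int) + 1 := by push_cast; ring
    rw [hcast, PySem.List.pyRange_one_succ_right (Int.natCast_nonneg K), List.foldl_append, ih]
    simp only [List.foldl_cons, List.foldl_nil]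
    simp only [Int.toNat_natCast, band_shift_one']
    rw [pbit_eq]
    rw [bor_step _ _ K (Int.emod_nonneg _ (by positivity)) (Int.emod_lt_of_pos _ (by positivity)) (ibit_cases _ _)]
    rw [emod_two_pow_succ]
-- ===== VERDICT (by name: the statement is the Claim_ definition above) =====
theorem bitwiseXOROfAllPairings_spec : Claim_equal_bitwiseXOROfAllPairings := by
  intro nums1 nums2 _
  unfold Spec_bitwiseXOROfAllPairings bitwiseXOROfAllPairings bitwiseXOROfAllPairings_alt
  have h := A_fold nums1 nums2 32
  rw [show ((32 : Nat) : Int) = 32 by norm_num] at h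
  simp only at h ⊢
  rw [h]
  change yval nums1 nums2 % 2 ^ 32 = PySem.Int.band (yval nums1 nums2) 4294967295
  rw [show (4294967295 : Int) = 2 ^ 32 - 1 by norm_num, band_mask]
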